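-- pv_equiv track=rewrite | github.com/FireRedNinja/advent-of-code | 2023/8/8.py | part2
-- ===== SOURCE A (Python) =====
-- from itertools import cycle
-- from math import lcm
--
-- def part2(data):
--     """Solve part 2"""
--
--     instructions = cycle(data["instructions"])
--
--     curr_node = list(filter(lambda x: x[-1] == "A", data.keys()))
--     node_steps = [0 for i in curr_node]
--     steps = 0
--
--     while not all([i[-1] == "Z" for i in curr_node]):
--         next_node = next(instructions)
--
--         for n in range(len(curr_node)):
--             if curr_node[n][-1] == "Z":
--                 continue
--
--             if next_node == "R":
--                 curr_node[n] = data[curr_node[n]][1]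
--             else:
--                 curr_node[n] = data[curr_node[n]][0]
--
--             if curr_node[n][-1] == "Z":
--                 if node_steps[n] == 0:
--                     node_steps[n] = steps + 1
--                 continue
--         steps += 1
--
--
--     return lcm(*node_steps)
-- ===== SOURCE B (Python) =====
-- from math import lcm
--
--
-- def part2(data):
--     """Solve part 2"""
--     instrs = data["instructions"]
--
--     def steps_to_z(node):
--         count = 0
--         while node[-1] != "Z":
--             ins = instrs[count % len(instrs)]
--             node = data[node][1 if ins == "R" else 0]
--             count += 1
--         return count
--
--     starts = [k for k in data if k[-1] == "A"]
--     return lcm(*[steps_to_z(s) for s in starts])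
-- ===== Notes on version B (the rewrite author's own statement) =====
-- stated objective: simpler
-- what changed: Replaces the lockstep walk that mutates parallel curr_node/node_steps lists under a shared instruction cycle with an independent per-start-node helper that walks its own path (indexing instructions modulo its own step count) until the first Z-node and returns that count, then takes the lcm of the counts.
import Mathlib
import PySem

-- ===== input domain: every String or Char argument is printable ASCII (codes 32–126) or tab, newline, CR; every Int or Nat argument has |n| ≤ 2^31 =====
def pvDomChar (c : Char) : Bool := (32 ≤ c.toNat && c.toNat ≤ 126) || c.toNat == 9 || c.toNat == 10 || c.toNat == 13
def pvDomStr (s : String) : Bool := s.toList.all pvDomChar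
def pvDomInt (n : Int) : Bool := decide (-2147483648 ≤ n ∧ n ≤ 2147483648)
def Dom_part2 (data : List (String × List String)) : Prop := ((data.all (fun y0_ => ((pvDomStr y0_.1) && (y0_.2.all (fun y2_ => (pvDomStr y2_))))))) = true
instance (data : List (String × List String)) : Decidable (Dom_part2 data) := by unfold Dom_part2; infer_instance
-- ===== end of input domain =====

-- B replaces A's lockstep multi-node walk (mutating parallel lists under one shared
-- instruction cycle) with an independent per-start-node walk to its first Z-node; same
-- return value, lcm of the per-node step counts. Objective: simpler.


-- shared by both Pythons: node[-1] == "Z"  (s[-1] on "" is an IndexError; Pre_part2 keeps "" away)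
def endsZ (node : String) : Bool := PySem.Str.pyGet? node (-1) == some 'Z'

-- math.lcm(*xs): left fold of binary lcm from 1 (both Pythons do `from math import lcm`)
def pyLcmList (xs : List Int) : Int := xs.foldl (fun a b => ((Int.lcm a b : Nat) : Int)) 1

-- ===== PORT A =====
-- one body pass of A's inner `for n in range(len(curr_node))`, on the pair (curr_node[n], node_steps[n])
def aStep (d : PySem.Dict String (List String)) (ins : String) (steps : Nat)
    (p : String × Int) : String × Int :=
  if endsZ p.1 then p          -- `continue` on frozen nodes
  else
    let nd := ((d.get? p.1).getD []).getD (if ins == "R" then 1 else 0) ""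
      -- data[curr_node[n]][1 or 0]; the defaults are never taken under Pre_part2
    if endsZ nd then (nd, if p.2 = 0 then ((steps : Int) + 1) else p.2)
    else (nd, p.2)

-- A's `while not all(...)` loop; `fuel` only totalizes it (Pre_part2 guarantees it suffices);
-- `next(instructions)` at iteration `steps` of the cycle is il[steps % len(il)]
def aLoop (d : PySem.Dict String (List String)) (il : List String) :
    Nat → List (String × Int) → Nat → Int
  | fuel, state, steps =>
    if state.all (fun p => endsZ p.1) then pyLcmList (state.map Prod.snd)
    else
      match fuel with
      | 0 => 0    -- unreachable under Pre_part2
      | fuel + 1 =>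
        aLoop d il fuel (state.map (aStep d (il.getD (steps % il.length) "") steps)) (steps + 1)

def part2 (data : List (String × List String)) : Int :=
  let d := PySem.Dict.ofList data
  let il := d.getD "instructions" []
  let currNode := d.keys.filter (fun k => PySem.Str.pyGet? k (-1) == some 'A')
  aLoop d il ((d.size + 1) * il.length + 1) (currNode.map (fun k => (k, (0 : Int)))) 0

-- ===== PORT B =====
-- Source B's steps_to_z: walk one node on its own, indexing instructions by its own count, until
-- a Z-node; fuel only totalizes the while loop (Pre_part2 guarantees it suffices)
def bWalk (d : PySem.Dict String (List String)) (il : List String) :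
    Nat → Nat → String → Int
  | fuel, count, node =>
    if endsZ node then (count : Int)
    else
      match fuel with
      | 0 => 0    -- unreachable under Pre_part2
      | fuel + 1 =>
        bWalk d il fuel (count + 1)
          (((d.get? node).getD []).getD
            (if il.getD (count % il.length) "" == "R" then 1 else 0) "")

def part2_alt (data : List (String × List String)) : Int :=
  let d := PySem.Dict.ofList data
  let il := d.getD "instructions" []
  let starts := d.keys.filter (fun k => PySem.Str.pyGet? k (-1) == some 'A')
  pyLcmList (starts.map (fun s => bWalk d il ((d.size + 1) * il.length + 1) 0 s))

-- ===== PRECONDITION & SPEC =====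
-- Pre_ helper: does the (deterministic) path from `node` at time `s` reach a node ending in
-- 'Z' within `fuel` steps?  A's termination is a genuine reachability property of the input
-- graph, so the weakest honest precondition is this bounded-reachability predicate; the bound
-- (|keys|+1)*len(instructions)+1 exceeds the number of (node, instruction-phase) states, so
-- every input on which the Python A returns satisfies it (a longer Z-free walk is periodic).
def pvReach (d : PySem.Dict String (List String)) (il : List String) :
    Nat → Nat → String → Bool
  | fuel, s, node =>
    if endsZ node then true
    else
      match fuel with
      | 0 => false
      | fuel + 1 =>
        pvReach d il fuel (s + 1)
          (((d.get? node).getD []).getD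
            (if il.getD (s % il.length) "" == "R" then 1 else 0) "")

-- Pre_ excludes exactly the inputs on which the Python A raises (missing "instructions" key:
-- KeyError; an empty-string key: IndexError on k[-1]; StopIteration on an empty instruction
-- list with start nodes present) or loops forever / raises mid-walk (a walk that never
-- reaches a Z-node within the state-space bound: a failing data[...] lookup or a too-short
-- entry or an empty successor sends pvReach into the non-Z sink "" and returns false).
def Pre_part2 (data : List (String × List String)) : Prop :=
  let d := PySem.Dict.ofList data
  let il := d.getD "instructions" []
  let starts := d.keys.filter (fun k => PySem.Str.pyGet? k (-1) == some 'A')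
  d.contains "instructions" = true ∧ (∀ k ∈ d.keys, k ≠ "") ∧
  (starts ≠ [] → il ≠ []) ∧
  (∀ st ∈ starts, pvReach d il ((d.size + 1) * il.length + 1) 0 st = true)
instance (data : List (String × List String)) : Decidable (Pre_part2 data) := by
  unfold Pre_part2; infer_instance

def pvWitness_part2 : (List (String × List String)) :=
  [("instructions", ["R", "L"]), ("AAA", ["AAB", "ZZZ"]), ("AAB", ["AAA", "AAA"]),
   ("ZZZ", ["ZZZ", "ZZZ"])]

def Spec_part2 (data : List (String × List String)) (out : Int) : Prop := out = part2_alt data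
instance (data : List (String × List String)) (out : Int) : Decidable (Spec_part2 data out) := by
  unfold Spec_part2; infer_instance

-- ===== CLAIM (what is proved, stated in full; the proofs are below) =====
def Claim_equal_part2 : Prop := ∀ (data : List (String × List String)),
  Dom_part2 data → Pre_part2 data → Spec_part2 data (part2 data)

-- ===== LEMMAS AND PROOFS =====

-- the successor node of a non-Z node at time k (what all three walks compute)
def succN (d : PySem.Dict String (List String)) (il : List String) (k : Nat)
    (node : String) : String :=
  ((d.get? node).getD []).getD (if il.getD (k % il.length) "" == "R" then 1 else 0) ""

-- small unfolding lemmas for the three fuel recursions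
theorem bWalk_endsZ (d : PySem.Dict String (List String)) (il : List String)
    (fuel count : Nat) (node : String) (h : endsZ node = true) :
    bWalk d il fuel count node = (count : Int) := by
  rw [bWalk.eq_def]; simp only [h, if_true]

theorem bWalk_step (d : PySem.Dict String (List String)) (il : List String)
    (fuel count : Nat) (node : String) (h : endsZ node = false) :
    bWalk d il (fuel + 1) count node = bWalk d il fuel (count + 1) (succN d il count node) := by
  rw [bWalk.eq_def]; simp only [h, Bool.false_eq_true, if_false]; rfl

theorem pvReach_zero (d : PySem.Dict String (List String)) (il : List String)
    (s : Nat) (node : String) (h : endsZ node = false) :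
    pvReach d il 0 s node = false := by
  rw [pvReach.eq_def]; simp only [h, Bool.false_eq_true, if_false]

theorem pvReach_step (d : PySem.Dict String (List String)) (il : List String)
    (fuel s : Nat) (node : String) (h : endsZ node = false) :
    pvReach d il (fuel + 1) s node = pvReach d il fuel (s + 1) (succN d il s node) := by
  rw [pvReach.eq_def]; simp only [h, Bool.false_eq_true, if_false]; rfl

theorem aLoop_all (d : PySem.Dict String (List String)) (il : List String)
    (fuel : Nat) (state : List (String × Int)) (steps : Nat)
    (h : state.all (fun p => endsZ p.1) = true) :
    aLoop d il fuel state steps = pyLcmList (state.map Prod.snd) := by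
  rw [aLoop.eq_def]; simp only [h, if_true]

theorem aLoop_step (d : PySem.Dict String (List String)) (il : List String)
    (fuel : Nat) (state : List (String × Int)) (steps : Nat)
    (h : state.all (fun p => endsZ p.1) = false) :
    aLoop d il (fuel + 1) state steps =
      aLoop d il fuel (state.map (aStep d (il.getD (steps % il.length) "") steps))
        (steps + 1) := by
  rw [aLoop.eq_def]; simp only [h, Bool.false_eq_true, if_false]

theorem aStep_endsZ (d : PySem.Dict String (List String)) (ins : String) (s : Nat)
    (p : String × Int) (h : endsZ p.1 = true) : aStep d ins s p = p := by
  rw [aStep]; simp only [h, if_true]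

-- aStep at the real instruction of time s, written through succN
theorem aStep_eq (d : PySem.Dict String (List String)) (il : List String) (s : Nat)
    (p : String × Int) (h : endsZ p.1 = false) :
    aStep d (il.getD (s % il.length) "") s p =
      if endsZ (succN d il s p.1) then
        (succN d il s p.1, if p.2 = 0 then ((s : Int) + 1) else p.2)
      else (succN d il s p.1, p.2) := by
  rw [aStep]; simp only [h, Bool.false_eq_true, if_false]; rfl

-- invariant carried by each (node, node_steps) pair of A's state at global time s
def GoodP (d : PySem.Dict String (List String)) (il : List String) (fuel s : Nat)
    (p : String × Int) : Prop :=
  endsZ p.1 = true ∨ (p.2 = 0 ∧ pvReach d il fuel s p.1 = true)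

-- the value A's loop will finally record for pair p, read off at time s
def valP (d : PySem.Dict String (List String)) (il : List String) (fuel s : Nat)
    (p : String × Int) : Int :=
  if endsZ p.1 then p.2 else bWalk d il fuel s p.1

theorem valP_eq (d : PySem.Dict String (List String)) (il : List String)
    (fuel s : Nat) (a : String) (b : Int) :
    valP d il fuel s (a, b) = if endsZ a then b else bWalk d il fuel s a := rfl

-- Main lemma: A's lockstep loop computes the lcm of the per-pair values valP.
theorem aLoop_eq_pyLcm (d : PySem.Dict String (List String)) (il : List String) :
    ∀ (fuel s : Nat) (state : List (String × Int)),
      (∀ p ∈ state, GoodP d il fuel s p) →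
      aLoop d il fuel state s = pyLcmList (state.map (valP d il fuel s)) := by
  intro fuel
  induction fuel with
  | zero =>
    intro s state hg
    by_cases hall : state.all (fun p => endsZ p.1) = true
    · rw [aLoop_all d il 0 state s hall]
      congr 1
      refine (List.map_congr_left (fun p hp => ?_)).symm
      have hz := List.all_eq_true.mp hall p hp
      rw [valP, if_pos hz]
    · exfalso
      have hallf : state.all (fun p => endsZ p.1) = false := by
        cases hb : state.all (fun p => endsZ p.1) <;> simp_all
      rcases List.all_eq_false.mp hallf with ⟨p, hp, hz⟩
      have hzf : endsZ p.1 = false := by cases hb : endsZ p.1 <;> simp_all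
      rcases hg p hp with h | ⟨_, hr⟩
      · rw [h] at hzf; exact Bool.noConfusion hzf
      · rw [pvReach_zero d il s p.1 hzf] at hr
        exact Bool.noConfusion hr
  | succ fuel ih =>
    intro s state hg
    by_cases hall : state.all (fun p => endsZ p.1) = true
    · rw [aLoop_all d il (fuel + 1) state s hall]
      congr 1
      refine (List.map_congr_left (fun p hp => ?_)).symm
      have hz := List.all_eq_true.mp hall p hp
      rw [valP, if_pos hz]
    · have hallf : state.all (fun p => endsZ p.1) = false := by
        cases hb : state.all (fun p => endsZ p.1) <;> simp_all
      rw [aLoop_step d il fuel state s hallf]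
      have hg' : ∀ p' ∈ state.map (aStep d (il.getD (s % il.length) "") s),
          GoodP d il fuel (s + 1) p' := by
        intro p' hp'
        rcases List.mem_map.mp hp' with ⟨p, hp, rfl⟩
        by_cases hz : endsZ p.1 = true
        · rw [aStep_endsZ d _ s p hz]; exact Or.inl hz
        · have hzf : endsZ p.1 = false := by cases hb : endsZ p.1 <;> simp_all
          rcases hg p hp with h | ⟨h0, hr⟩
          · rw [h] at hzf; exact absurd hzf (by simp)
          · rw [pvReach_step d il fuel s p.1 hzf] at hr
            rw [aStep_eq d il s p hzf]
            by_cases hznd : endsZ (succN d il s p.1) = true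
            · rw [if_pos hznd]; exact Or.inl hznd
            · rw [if_neg hznd]
              exact Or.inr ⟨h0, hr⟩
      rw [ih (s + 1) _ hg']
      congr 1
      rw [List.map_map]
      refine List.map_congr_left (fun p hp => ?_)
      show valP d il fuel (s + 1) (aStep d (il.getD (s % il.length) "") s p) =
        valP d il (fuel + 1) s p
      by_cases hz : endsZ p.1 = true
      · rw [aStep_endsZ d _ s p hz, valP, if_pos hz, valP, if_pos hz]
      · have hzf : endsZ p.1 = false := by cases hb : endsZ p.1 <;> simp_all
        rw [aStep_eq d il s p hzf]
        by_cases hznd : endsZ (succN d il s p.1) = true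
        · have h0 : p.2 = 0 := by
            rcases hg p hp with h | ⟨h0, _⟩
            · rw [h] at hzf; exact Bool.noConfusion hzf
            · exact h0
          rw [if_pos hznd, valP_eq, if_pos hznd, h0, if_pos rfl,
            valP, if_neg hz, bWalk_step d il fuel s p.1 hzf,
            bWalk_endsZ d il fuel (s + 1) _ hznd]
          push_cast; ring
        · rw [if_neg hznd, valP_eq, if_neg hznd, valP, if_neg hz,
            bWalk_step d il fuel s p.1 hzf]

theorem endsA_not_endsZ (k : String)
    (h : (PySem.Str.pyGet? k (-1) == some 'A') = true) : endsZ k = false := by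
  have hk : PySem.Str.pyGet? k (-1) = some 'A' := eq_of_beq h
  rw [endsZ, hk]; rfl

-- ===== VERDICT (by name: the statement is the Claim_ definition above) =====
theorem part2_spec : Claim_equal_part2 := by
  intro data _hdom hpre
  simp only [Pre_part2] at hpre
  obtain ⟨_hc, _hne, _hil, hreach⟩ := hpre
  unfold Spec_part2
  simp only [part2, part2_alt]
  rw [aLoop_eq_pyLcm]
  · congr 1
    rw [List.map_map]
    refine List.map_congr_left (fun k hk => ?_)
    have hz := endsA_not_endsZ k (List.mem_filter.mp hk).2
    show valP _ _ _ _ (k, (0 : Int)) = _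
    rw [valP_eq, if_neg (by rw [hz]; exact Bool.noConfusion)]
  · intro p hp
    rcases List.mem_map.mp hp with ⟨k, hk, rfl⟩
    exact Or.inr ⟨rfl, hreach k hk⟩
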